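-- pv_equiv track=rewrite | github.com/israeltankam/nemo | archives/nemo_9.0.py | generate_deployment_vector
-- ===== SOURCE A (Python) =====
-- def generate_deployment_vector(input_string):
--     temp = ""
--     n_count = 0
--
--     for char in input_string:
--         if char == "N":
--             n_count += 1
--         else:
--             if n_count > 0:
--                 temp += str(n_count)
--                 n_count = 0
--
--             if temp and (temp[-1] == char or (temp[-1] == "S" and char == "R") or (temp[-1] == "R" and char == "S")):
--                 temp += "0"
--             temp += char
--
--     if n_count > 0:
--         temp += str(n_count)
--
--     deployment = ""
--     jn = []
--
--     num_buffer = ""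
--     for char in temp:
--         if char.isdigit():
--             num_buffer += char
--         else:
--             if num_buffer:
--                 jn.append(int(num_buffer))
--                 num_buffer = ""
--             deployment += char
--
--     if num_buffer:
--         jn.append(int(num_buffer))
--
--     jn_vector = [int(num) for num in jn]  # Convert jn to int vector
--     deployment_vector = [1 if char == 'R' else 0 for char in deployment]
--     if len(jn_vector)==len(deployment_vector):
--         jn_vector = jn_vector[:-1] # To discard deployment ended by Non-Host
--     return deployment_vector, jn_vector
-- ===== SOURCE B (Python) =====
-- def generate_deployment_vector(input_string):
--     # Single fused pass: no intermediate `temp` string, no second scan.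
--     n_count = 0
--     prev = None          # last character that the run-length encoding would carry
--     num_buffer = ""      # pending digit run (counts and literal digit chars merge)
--     deployment_vector = []
--     jn_vector = []
--
--     for char in input_string:
--         if char == "N":
--             n_count += 1
--             continue
--         if n_count > 0:
--             ds = str(n_count)
--             num_buffer += ds
--             prev = ds[-1]
--             n_count = 0
--         if prev is not None and (prev == char or (prev == "S" and char == "R") or (prev == "R" and char == "S")):
--             num_buffer += "0"
--         if char.isdigit():
--             num_buffer += char
--             prev = char
--         else:
--             if num_buffer:
--                 jn_vector.append(int(num_buffer))
--                 num_buffer = ""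
--             deployment_vector.append(1 if char == 'R' else 0)
--             prev = char
--
--     if n_count > 0:
--         num_buffer += str(n_count)
--     if num_buffer:
--         jn_vector.append(int(num_buffer))
--     if len(jn_vector) == len(deployment_vector):
--         jn_vector = jn_vector[:-1]
--     return deployment_vector, jn_vector
-- ===== Notes on version B (the rewrite author's own statement) =====
-- stated objective: alternative
-- what changed: B replaces A two-phase algorithm (build an intermediate run-length string temp, then re-scan it splitting digit runs from letters) with a single fused pass over the input that maintains the N-run counter, the previous emitted character and the pending digit buffer directly, emitting both vectors as it goes; dropping the intermediate string and second scan gives a measured constant-factor speedup.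
import Mathlib
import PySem

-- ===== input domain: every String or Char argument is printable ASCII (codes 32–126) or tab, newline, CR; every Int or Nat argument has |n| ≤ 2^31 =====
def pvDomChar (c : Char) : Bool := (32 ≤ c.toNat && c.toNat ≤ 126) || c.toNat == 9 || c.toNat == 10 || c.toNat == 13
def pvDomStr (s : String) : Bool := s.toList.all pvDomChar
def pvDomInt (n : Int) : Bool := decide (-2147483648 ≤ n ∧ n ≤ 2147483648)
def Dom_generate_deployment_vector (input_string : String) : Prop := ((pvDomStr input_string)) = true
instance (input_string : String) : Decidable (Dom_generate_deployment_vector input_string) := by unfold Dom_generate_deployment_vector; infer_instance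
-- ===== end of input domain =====

-- B fuses A's two passes (build `temp`, then re-scan it) into one pass over the input; alternative decomposition (a timing run measured a constant-factor speedup).

-- int(num_buffer) on a nonempty digit string (the only strings either program parses); exact there
def pvParseInt (buf : List Char) : Int := (PySem.Int.ofChars? buf).getD 0

-- ===== PORT A =====
-- first loop of A: state (temp, n_count)
def pvStep1 (st : List Char × Int) (c : Char) : List Char × Int :=
  if c = 'N' then (st.1, st.2 + 1)
  else
    let temp := if st.2 > 0 then st.1 ++ PySem.Int.toChars st.2 else st.1
    let temp :=
      match temp.getLast? with
      | some p => if p = c ∨ (p = 'S' ∧ c = 'R') ∨ (p = 'R' ∧ c = 'S') then temp ++ ['0'] else temp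
      | none => temp
    (temp ++ [c], 0)

-- second loop of A: state (jn, deployment, num_buffer)
def pvStep2 (st : List Int × List Char × List Char) (c : Char) : List Int × List Char × List Char :=
  if PySem.Str.isdigit c then (st.1, st.2.1, st.2.2 ++ [c])
  else
    let jn := if st.2.2 ≠ [] then st.1 ++ [pvParseInt st.2.2] else st.1
    (jn, st.2.1 ++ [c], [])

def generate_deployment_vector (input_string : String) : List Int × List Int :=
  let s1 := input_string.toList.foldl pvStep1 ([], 0)
  let temp := if s1.2 > 0 then s1.1 ++ PySem.Int.toChars s1.2 else s1.1
  let s2 := temp.foldl pvStep2 ([], [], [])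
  let jn := if s2.2.2 ≠ [] then s2.1 ++ [pvParseInt s2.2.2] else s2.1
  let jn_vector := jn.map (fun num => num)          -- [int(num) for num in jn]
  let deployment_vector := s2.2.1.map (fun c => if c = 'R' then (1 : Int) else 0)
  let jn_vector := if jn_vector.length = deployment_vector.length then jn_vector.dropLast else jn_vector
  (deployment_vector, jn_vector)

-- ===== PORT B =====
structure PVB where
  n : Int
  prev : Option Char
  buf : List Char
  dep : List Int
  jn : List Int
deriving Repr

def pvStepB (st : PVB) (c : Char) : PVB :=
  if c = 'N' then { st with n := st.n + 1 }
  else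
    let st :=
      if st.n > 0 then
        let ds := PySem.Int.toChars st.n
        { st with buf := st.buf ++ ds, prev := some (ds.getLastD '0'), n := 0 }
      else st
    let st :=
      match st.prev with
      | some p => if p = c ∨ (p = 'S' ∧ c = 'R') ∨ (p = 'R' ∧ c = 'S') then { st with buf := st.buf ++ ['0'] } else st
      | none => st
    if PySem.Str.isdigit c then { st with buf := st.buf ++ [c], prev := some c }
    else
      let st := if st.buf ≠ [] then { st with jn := st.jn ++ [pvParseInt st.buf], buf := [] } else st
      { st with dep := st.dep ++ [if c = 'R' then (1 : Int) else 0], prev := some c }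

def generate_deployment_vector_alt (input_string : String) : List Int × List Int :=
  let st := input_string.toList.foldl pvStepB ⟨0, none, [], [], []⟩
  let buf := if st.n > 0 then st.buf ++ PySem.Int.toChars st.n else st.buf
  let jn := if buf ≠ [] then st.jn ++ [pvParseInt buf] else st.jn
  let jn := if jn.length = st.dep.length then jn.dropLast else jn
  (st.dep, jn)

-- ===== PRECONDITION & SPEC =====
def Spec_generate_deployment_vector (input_string : String) (out : List Int × List Int) : Prop := out = generate_deployment_vector_alt input_string
instance (input_string : String) (out : List Int × List Int) : Decidable (Spec_generate_deployment_vector input_string out) := by unfold Spec_generate_deployment_vector; infer_instance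

-- ===== CLAIM (what is proved, stated in full; the proofs are below) =====
def Claim_equal_generate_deployment_vector : Prop := ∀ (input_string : String), Dom_generate_deployment_vector input_string → Spec_generate_deployment_vector input_string (generate_deployment_vector input_string)

-- ===== LEMMAS AND PROOFS =====

def pvBit (c : Char) : Int := if c = 'R' then 1 else 0

-- accumulator of A's second pass never shrinks
theorem pvToDigitsCore_len_le (f : Nat) : ∀ (m : Nat) (acc : List Char),
    acc.length ≤ (Nat.toDigitsCore 10 f m acc).length := by
  induction f with
  | zero => intro m acc; simp [Nat.toDigitsCore]
  | succ f ih =>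
    intro m acc
    simp only [Nat.toDigitsCore]
    split
    · simp
    · exact le_trans (by simp) (ih (m / 10) ((m % 10).digitChar :: acc))

theorem pvToDigitsCore_ne (f : Nat) (m : Nat) (acc : List Char) (hf : 0 < f) :
    acc.length < (Nat.toDigitsCore 10 f m acc).length := by
  cases f with
  | zero => omega
  | succ f =>
    simp only [Nat.toDigitsCore]
    split
    · simp
    · exact lt_of_lt_of_le (by simp) (pvToDigitsCore_len_le f (m / 10) ((m % 10).digitChar :: acc))

theorem pvDigitChar_isdigit (m : Nat) (h : m < 10) : PySem.Str.isdigit (Nat.digitChar m) = true := by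
  interval_cases m <;> decide

theorem pvToDigitsCore_digits (f : Nat) : ∀ (m : Nat) (acc : List Char),
    (∀ c ∈ acc, PySem.Str.isdigit c = true) →
    ∀ c ∈ Nat.toDigitsCore 10 f m acc, PySem.Str.isdigit c = true := by
  induction f with
  | zero => intro m acc hacc; simpa [Nat.toDigitsCore] using hacc
  | succ f ih =>
    intro m acc hacc
    simp only [Nat.toDigitsCore]
    have hd : PySem.Str.isdigit (Nat.digitChar (m % 10)) = true :=
      pvDigitChar_isdigit _ (Nat.mod_lt _ (by norm_num))
    split
    · intro c hc
      rcases List.mem_cons.mp hc with h | h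
      · subst h; exact hd
      · exact hacc c h
    · refine ih (m / 10) _ ?_
      intro c hc
      rcases List.mem_cons.mp hc with h | h
      · subst h; exact hd
      · exact hacc c h

theorem pvToChars_pos (n : Int) (hn : 0 < n) :
    PySem.Int.toChars n ≠ [] ∧ ∀ c ∈ PySem.Int.toChars n, PySem.Str.isdigit c = true := by
  have h1 : ¬ n < 0 := by omega
  simp only [PySem.Int.toChars, if_neg h1]
  constructor
  · intro h
    have := pvToDigitsCore_ne (n.toNat + 1) n.toNat [] (by omega)
    rw [show Nat.toDigits 10 n.toNat = Nat.toDigitsCore 10 (n.toNat + 1) n.toNat [] from rfl] at h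
    simp [h] at this
  · exact pvToDigitsCore_digits _ _ [] (by simp)

-- folding A's second pass over a run of digit chars just appends them to the buffer
theorem pvStep2_digits : ∀ (ds : List Char), (∀ c ∈ ds, PySem.Str.isdigit c = true) →
    ∀ (st : List Int × List Char × List Char),
    ds.foldl pvStep2 st = (st.1, st.2.1, st.2.2 ++ ds) := by
  intro ds
  induction ds with
  | nil => intro _ st; simp
  | cons d ds ih =>
    intro h st
    have hd : PySem.Str.isdigit d = true := h d (by simp)
    simp only [List.foldl_cons, pvStep2, hd, if_pos]
    rw [ih (fun c hc => h c (by simp [hc]))]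
    simp

-- the simulation invariant between A's state after a prefix and B's state
abbrev pvRel (temp : List Char) (n : Int) (st : PVB) : Prop :=
  0 ≤ n ∧ st.n = n ∧ st.prev = temp.getLast? ∧
  st.jn = (temp.foldl pvStep2 ([], [], [])).1 ∧
  st.dep = (temp.foldl pvStep2 ([], [], [])).2.1.map pvBit ∧
  st.buf = (temp.foldl pvStep2 ([], [], [])).2.2

theorem pvRel_step (temp : List Char) (n : Int) (st : PVB) (c : Char) (h : pvRel temp n st) :
    pvRel (pvStep1 (temp, n) c).1 (pvStep1 (temp, n) c).2 (pvStepB st c) := by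
  obtain ⟨hge, hn, hprev, hjn, hdep, hbuf⟩ := h
  subst hn
  by_cases hc : c = 'N'
  · subst hc
    rw [show pvStep1 (temp, st.n) 'N' = (temp, st.n + 1) from by simp [pvStep1],
        show pvStepB st 'N' = { st with n := st.n + 1 } from by simp [pvStepB]]
    exact ⟨by omega, rfl, hprev, hjn, hdep, hbuf⟩
  · simp only [pvStep1, pvStepB, if_neg hc]
    -- stage 1: emit the pending count into temp / the buffer
    set temp1 := if st.n > 0 then temp ++ PySem.Int.toChars st.n else temp with htemp1
    set st1 := if st.n > 0 then
        let ds := PySem.Int.toChars st.n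
        { st with buf := st.buf ++ ds, prev := some (ds.getLastD '0'), n := 0 } else st with hst1
    have stage1 : st1.n = 0 ∧ st1.prev = temp1.getLast? ∧
        st1.jn = (temp1.foldl pvStep2 ([], [], [])).1 ∧
        st1.dep = (temp1.foldl pvStep2 ([], [], [])).2.1.map pvBit ∧
        st1.buf = (temp1.foldl pvStep2 ([], [], [])).2.2 := by
      rw [htemp1, hst1]
      by_cases hpos : st.n > 0
      · obtain ⟨hne, hdig⟩ := pvToChars_pos st.n hpos
        have hfold : (temp ++ PySem.Int.toChars st.n).foldl pvStep2 ([], [], []) =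
            ((temp.foldl pvStep2 ([], [], [])).1,
             (temp.foldl pvStep2 ([], [], [])).2.1,
             (temp.foldl pvStep2 ([], [], [])).2.2 ++ PySem.Int.toChars st.n) := by
          rw [List.foldl_append, pvStep2_digits _ hdig]
        have hlast : (temp ++ PySem.Int.toChars st.n).getLast? =
            some ((PySem.Int.toChars st.n).getLastD '0') := by
          rw [List.getLast?_append_of_ne_nil temp hne]
          cases hgl : (PySem.Int.toChars st.n).getLast? with
          | none => exact absurd (List.getLast?_eq_none_iff.mp hgl) hne
          | some x => simp [List.getLastD_eq_getLast?, hgl]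
        refine ⟨?_, ?_, ?_, ?_, ?_⟩
        · simp [if_pos hpos]
        · simp only [if_pos hpos]; exact hlast.symm
        · simp only [if_pos hpos, hfold]; exact hjn
        · simp only [if_pos hpos, hfold]; exact hdep
        · simp only [if_pos hpos, hfold]; rw [hbuf]
      · simp only [if_neg hpos]
        exact ⟨by omega, hprev, hjn, hdep, hbuf⟩
    obtain ⟨hn1, hprev1, hjn1, hdep1, hbuf1⟩ := stage1
    clear htemp1 hst1 hprev hjn hdep hbuf
    -- stage 2: possibly insert a '0'
    set temp2 := (match temp1.getLast? with
      | some p => if p = c ∨ (p = 'S' ∧ c = 'R') ∨ (p = 'R' ∧ c = 'S') then temp1 ++ ['0'] else temp1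
      | none => temp1) with htemp2
    set st2 := (match st1.prev with
      | some p => if p = c ∨ (p = 'S' ∧ c = 'R') ∨ (p = 'R' ∧ c = 'S') then { st1 with buf := st1.buf ++ ['0'] } else st1
      | none => st1) with hst2
    have stage2 : st2.n = 0 ∧ st2.prev = st1.prev ∧
        st2.jn = (temp2.foldl pvStep2 ([], [], [])).1 ∧
        st2.dep = (temp2.foldl pvStep2 ([], [], [])).2.1.map pvBit ∧
        st2.buf = (temp2.foldl pvStep2 ([], [], [])).2.2 := by
      rw [htemp2, hst2, hprev1]
      cases hgl : temp1.getLast? with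
      | none => exact ⟨hn1, hprev1.trans hgl, hjn1, hdep1, hbuf1⟩
      | some p =>
        by_cases hcond : p = c ∨ (p = 'S' ∧ c = 'R') ∨ (p = 'R' ∧ c = 'S')
        · have hfold : (temp1 ++ ['0']).foldl pvStep2 ([], [], []) =
              ((temp1.foldl pvStep2 ([], [], [])).1,
               (temp1.foldl pvStep2 ([], [], [])).2.1,
               (temp1.foldl pvStep2 ([], [], [])).2.2 ++ ['0']) := by
            rw [List.foldl_append,
                pvStep2_digits ['0'] (by intro x hx; rw [List.mem_singleton] at hx; subst hx; decide)]
          refine ⟨?_, ?_, ?_, ?_, ?_⟩ <;> dsimp only <;> simp only [if_pos hcond, hfold]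
          · exact hn1
          · exact hjn1
          · exact hdep1
          · rw [hbuf1]
        · refine ⟨?_, ?_, ?_, ?_, ?_⟩ <;> dsimp only <;> simp only [if_neg hcond]
          · exact hn1
          · exact hprev1.trans hgl
          · exact hjn1
          · exact hdep1
          · exact hbuf1
    obtain ⟨hn2, hprev2, hjn2, hdep2, hbuf2⟩ := stage2
    clear htemp2 hst2 hn1 hprev1 hjn1 hdep1 hbuf1
    -- stage 3: append c itself
    have hfoldc : (temp2 ++ [c]).foldl pvStep2 ([], [], []) =
        pvStep2 (temp2.foldl pvStep2 ([], [], [])) c := by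
      rw [List.foldl_append]; rfl
    by_cases hdig : PySem.Str.isdigit c = true
    · simp only [if_pos hdig]
      refine ⟨le_refl 0, hn2, ?_, ?_, ?_, ?_⟩
      · show some c = (temp2 ++ [c]).getLast?
        rw [List.getLast?_concat]
      · show st2.jn = _
        rw [hfoldc]; simp only [pvStep2, if_pos hdig]; exact hjn2
      · show st2.dep = _
        rw [hfoldc]; simp only [pvStep2, if_pos hdig]; exact hdep2
      · show st2.buf ++ [c] = _
        rw [hfoldc]; simp only [pvStep2, if_pos hdig]; rw [hbuf2]
    · simp only [if_neg hdig]
      by_cases hb : st2.buf ≠ []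
      · have hb' : (temp2.foldl pvStep2 ([], [], [])).2.2 ≠ [] := hbuf2 ▸ hb
        simp only [if_pos hb]
        refine ⟨le_refl 0, hn2, ?_, ?_, ?_, ?_⟩
        · show some c = (temp2 ++ [c]).getLast?
          rw [List.getLast?_concat]
        · show st2.jn ++ [pvParseInt st2.buf] = _
          rw [hfoldc]; simp only [pvStep2, if_neg hdig, if_pos hb']
          rw [hjn2, hbuf2]
        · show st2.dep ++ [if c = 'R' then (1 : Int) else 0] = _
          rw [hfoldc]; simp only [pvStep2, if_neg hdig]
          rw [hdep2]; simp [pvBit]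
        · rw [hfoldc]; simp [pvStep2, hdig, hb']
      · have hb' : ¬ (temp2.foldl pvStep2 ([], [], [])).2.2 ≠ [] := hbuf2 ▸ hb
        simp only [if_neg hb]
        refine ⟨le_refl 0, hn2, ?_, ?_, ?_, ?_⟩
        · show some c = (temp2 ++ [c]).getLast?
          rw [List.getLast?_concat]
        · show st2.jn = _
          rw [hfoldc]; simp only [pvStep2, if_neg hdig, if_neg hb']
          exact hjn2
        · show st2.dep ++ [if c = 'R' then (1 : Int) else 0] = _
          rw [hfoldc]; simp only [pvStep2, if_neg hdig]
          rw [hdep2]; simp [pvBit]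
        · rw [hfoldc]
          rw [hbuf2] at hb
          simp only [pvStep2, if_neg hdig, if_neg hb']
          rw [hbuf2]
          exact of_not_not (by simpa using hb)

theorem pvRel_foldl : ∀ (cs : List Char) (temp : List Char) (n : Int) (st : PVB),
    pvRel temp n st →
    pvRel (cs.foldl pvStep1 (temp, n)).1 (cs.foldl pvStep1 (temp, n)).2 (cs.foldl pvStepB st) := by
  intro cs
  induction cs with
  | nil => intro temp n st h; exact h
  | cons c cs ih =>
    intro temp n st h
    have := pvRel_step temp n st c h
    simpa using ih (pvStep1 (temp, n) c).1 (pvStep1 (temp, n) c).2 (pvStepB st c) this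

-- ===== VERDICT (by name: the statement is the Claim_ definition above) =====
theorem generate_deployment_vector_spec : Claim_equal_generate_deployment_vector := by
  intro s _
  show generate_deployment_vector s = generate_deployment_vector_alt s
  have h := pvRel_foldl s.toList [] 0 ⟨0, none, [], [], []⟩
    ⟨le_refl 0, rfl, rfl, rfl, rfl, rfl⟩
  set stB := s.toList.foldl pvStepB ⟨0, none, [], [], []⟩ with hstB
  set s1 := s.toList.foldl pvStep1 ([], 0) with hs1
  obtain ⟨_, hn, _, hjn, hdep, hbuf⟩ := h
  unfold generate_deployment_vector generate_deployment_vector_alt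
  rw [← hstB, ← hs1]
  -- the trailing count lands in the buffer on both sides
  have hfinal : (if s1.2 > 0 then s1.1 ++ PySem.Int.toChars s1.2 else s1.1).foldl pvStep2 ([], [], []) =
      ((s1.1.foldl pvStep2 ([], [], [])).1,
       (s1.1.foldl pvStep2 ([], [], [])).2.1,
       if s1.2 > 0 then (s1.1.foldl pvStep2 ([], [], [])).2.2 ++ PySem.Int.toChars s1.2
       else (s1.1.foldl pvStep2 ([], [], [])).2.2) := by
    by_cases hpos : s1.2 > 0
    · obtain ⟨_, hdig⟩ := pvToChars_pos s1.2 hpos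
      simp only [if_pos hpos, List.foldl_append, pvStep2_digits _ hdig]
    · simp [if_neg hpos]
  dsimp only
  rw [hfinal]
  simp only [show (fun c => if c = 'R' then (1 : Int) else 0) = pvBit from rfl, List.map_id',
    ← hdep, ← hn, ← hjn, ← hbuf]
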